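-- pv_equiv track=rewrite | github.com/diogotcorreia/advent-of-code | 2020/10/solution.py | getBranchesSizes
-- ===== SOURCE A (Python) =====
-- def getBranchesSizes(adapters):
--     branches = []
--
--     adapterCount = len(adapters)
--
--     currentBranch = []
--     for i in range(adapterCount):
--         if i == 0:
--             diff = adapters[i]
--             if diff == 1:
--                 currentBranch.append(i)
--         else:
--             diff = adapters[i] - adapters[i - 1]
--             if diff == 1:
--                 currentBranch.append(i)
--             elif currentBranch != []:
--                 branches.append(len(currentBranch))
--                 currentBranch = []
--
--     if currentBranch != []:
--         branches.append(len(currentBranch))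
--         currentBranch = []
--     return branches
-- ===== SOURCE B (Python) =====
-- def getBranchesSizes(adapters):
--     # Boundary-position arithmetic: record indices where the diff is NOT 1
--     # (with sentinels -1 and n); run lengths of diff-1 runs are the gaps
--     # between consecutive boundaries, minus one.
--     n = len(adapters)
--     bounds = [-1]
--     prev = 0
--     for i, a in enumerate(adapters):
--         if a - prev != 1:
--             bounds.append(i)
--         prev = a
--     bounds.append(n)
--     return [q - p - 1 for p, q in zip(bounds, bounds[1:]) if q - p > 1]
-- ===== Notes on version B (the rewrite author's own statement) =====
-- stated objective: alternative
-- what changed: Replaces A's fused state machine (grow-and-flush a currentBranch list per element) by boundary-position arithmetic: record the indices whose diff is not 1 (with sentinels -1 and n) and compute each run length as the gap between consecutive boundaries minus one.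
import Mathlib
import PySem

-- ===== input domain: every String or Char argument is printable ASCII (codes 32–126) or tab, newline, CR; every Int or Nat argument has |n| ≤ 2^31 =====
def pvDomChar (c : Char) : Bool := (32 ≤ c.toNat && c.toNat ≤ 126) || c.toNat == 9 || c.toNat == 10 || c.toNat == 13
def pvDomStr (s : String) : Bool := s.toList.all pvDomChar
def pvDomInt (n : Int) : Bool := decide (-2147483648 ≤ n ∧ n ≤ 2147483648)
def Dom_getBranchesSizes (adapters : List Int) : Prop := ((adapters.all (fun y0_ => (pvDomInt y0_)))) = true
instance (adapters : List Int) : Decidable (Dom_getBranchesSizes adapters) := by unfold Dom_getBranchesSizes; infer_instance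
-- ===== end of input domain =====

-- B replaces A's fused grow-and-flush state machine by boundary-position arithmetic:
-- collect the indices whose diff is not 1 (with sentinels -1 and n) and return the
-- gaps between consecutive boundaries minus one; same O(n) cost, alternative structure.

-- ===== PORT A =====
-- loop body of A's `for i in range(adapterCount)` (state = (branches, currentBranch))
def pvStepA (adapters : List Int) (st : List Int × List Int) (i : Int) : List Int × List Int :=
  if i == 0 then
    let diff := PySem.List.pyGetD adapters i 0
    if diff == 1 then (st.1, st.2 ++ [i]) else st
  else
    let diff := PySem.List.pyGetD adapters i 0 - PySem.List.pyGetD adapters (i - 1) 0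
    if diff == 1 then (st.1, st.2 ++ [i])
    else if st.2 ≠ [] then (st.1 ++ [(st.2.length : Int)], ([] : List Int))
    else st

-- A's trailing `if currentBranch != []: branches.append(len(currentBranch))`
def pvFinishA (st : List Int × List Int) : List Int :=
  if st.2 ≠ [] then st.1 ++ [(st.2.length : Int)] else st.1

def getBranchesSizes (adapters : List Int) : List Int :=
  pvFinishA ((PySem.List.pyRange 0 (adapters.length : Int) 1).foldl (pvStepA adapters) ([], []))

-- ===== PORT B =====
-- Source B's `for i, a in enumerate(adapters)` loop: the boundary indices it appends
-- (state carried: prev = previous adapter value, i = current index)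
def pvBadIdx (prev : Int) (i : Int) : List Int → List Int
  | [] => []
  | a :: rest => (if a - prev ≠ 1 then [i] else []) ++ pvBadIdx a (i + 1) rest

def getBranchesSizes_alt (adapters : List Int) : List Int :=
  -- bounds = [-1] ++ loop-appended boundary indices ++ [n]
  let bounds : List Int := -1 :: (pvBadIdx 0 0 adapters ++ [(adapters.length : Int)])
  -- [q - p - 1 for p, q in zip(bounds, bounds[1:]) if q - p > 1]
  ((bounds.zip (bounds.drop 1)).filter (fun p => decide (p.2 - p.1 > 1))).map
    (fun p => p.2 - p.1 - 1)

-- ===== PRECONDITION & SPEC =====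
def Spec_getBranchesSizes (adapters : List Int) (out : List Int) : Prop := out = getBranchesSizes_alt adapters
instance (adapters : List Int) (out : List Int) : Decidable (Spec_getBranchesSizes adapters out) := by unfold Spec_getBranchesSizes; infer_instance

-- ===== CLAIM (what is proved, stated in full; the proofs are below) =====
def Claim_equal_getBranchesSizes : Prop := ∀ (adapters : List Int), Dom_getBranchesSizes adapters → Spec_getBranchesSizes adapters (getBranchesSizes adapters)

-- ===== LEMMAS AND PROOFS =====

-- common reference, fused with difference-taking (prev = previous adapter value)
def pvRunsP (cnt : Nat) (prev : Int) : List Int → List Int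
  | [] => if cnt ≠ 0 then [(cnt : Int)] else []
  | x :: xs =>
      if x - prev = 1 then pvRunsP (cnt + 1) x xs
      else if cnt ≠ 0 then (cnt : Int) :: pvRunsP 0 x xs else pvRunsP 0 x xs

-- recursive characterization of the zip/filter/map pair pass of B
def pvPairs (b : Int) : List Int → List Int
  | [] => []
  | c :: rest => (if c - b > 1 then [c - b - 1] else []) ++ pvPairs c rest

theorem pvPairs_eq (bs : List Int) : ∀ b,
    (((b :: bs).zip bs).filter (fun p => decide (p.2 - p.1 > 1))).map (fun p => p.2 - p.1 - 1)
      = pvPairs b bs := by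
  induction bs with
  | nil => intro b; rfl
  | cons c rest ih =>
      intro b
      simp only [List.zip_cons_cons, List.filter_cons, pvPairs]
      by_cases h : c - b > 1 <;> simp [h, ih c]

theorem pvBounds_runs (tail : List Int) : ∀ (prev b : Int) (cnt : Nat) (i : Int),
    i = b + 1 + (cnt : Int) →
    pvPairs b (pvBadIdx prev i tail ++ [i + (tail.length : Int)]) = pvRunsP cnt prev tail := by
  induction tail with
  | nil =>
      intro prev b cnt i hi
      subst hi
      simp only [pvBadIdx, List.nil_append, List.length_nil, Int.natCast_zero, add_zero,
        pvPairs, List.append_nil, pvRunsP]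
      by_cases h : cnt = 0
      · subst h; norm_num
      · have : b + 1 + (cnt : Int) - b > 1 := by
          have : (1 : Int) ≤ (cnt : Int) := by exact_mod_cast Nat.one_le_iff_ne_zero.mpr h
          omega
        simp [this, h]
        omega
  | cons x xs ih =>
      intro prev b cnt i hi
      have hs : i + ((xs.length + 1 : Nat) : Int) = (i + 1) + (xs.length : Int) := by
        push_cast; ring
      simp only [pvBadIdx, pvRunsP, List.length_cons, hs]
      by_cases hd : x - prev = 1
      · simp only [hd, ne_eq, not_true_eq_false, if_false, List.nil_append]
        rw [ih x b (cnt + 1) (i + 1) (by push_cast; omega)]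
        simp
      · simp only [hd, ne_eq, not_false_eq_true, if_true, List.cons_append, List.nil_append,
          pvPairs]
        rw [ih x i 0 (i + 1) (by push_cast; omega)]
        subst hi
        by_cases hc : cnt = 0
        · subst hc; simp
        · have hgt : b + 1 + (cnt : Int) - b > 1 := by
            have : (1 : Int) ≤ (cnt : Int) := by exact_mod_cast Nat.one_le_iff_ne_zero.mpr hc
            omega
          simp [hgt, hc]
          omega

theorem pvB_eq (adapters : List Int) :
    getBranchesSizes_alt adapters = pvRunsP 0 0 adapters := by
  unfold getBranchesSizes_alt
  simp only [List.drop_one, List.tail_cons]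
  rw [pvPairs_eq]
  have := pvBounds_runs adapters 0 (-1) 0 0 (by norm_num)
  simpa using this

theorem pvA_loop (adapters : List Int) :
    ∀ (tail : List Int) (k : Nat) (prev : Int) (branches cur : List Int),
    adapters.drop k = tail → 1 ≤ k →
    PySem.List.pyGetD adapters ((k : Int) - 1) 0 = prev →
    pvFinishA ((PySem.List.pyRange (k : Int) (adapters.length : Int) 1).foldl (pvStepA adapters) (branches, cur))
      = branches ++ pvRunsP cur.length prev tail := by
  intro tail
  induction tail with
  | nil =>
      intro k prev branches cur hdrop hk hprev
      have hlen : adapters.length ≤ k := List.drop_eq_nil_iff.mp hdrop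
      rw [PySem.List.pyRange_one_eq_nil (by exact_mod_cast hlen)]
      cases cur <;> simp [pvFinishA, pvRunsP]
  | cons x xs ih =>
      intro k prev branches cur hdrop hk hprev
      have hklt : k < adapters.length := by
        by_contra h
        rw [List.drop_eq_nil_iff.mpr (by omega)] at hdrop
        simp at hdrop
      have hgetk : adapters[k]? = some x := by
        have h0 := congrArg (fun l => l[0]?) hdrop
        simpa [List.getElem?_drop] using h0
      have hpyk : PySem.List.pyGetD adapters ((k : Int)) 0 = x := by
        rw [PySem.List.pyGetD_natCast]
        simp [List.getD_eq_getElem?_getD, hgetk]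
      have hdrop' : adapters.drop (k + 1) = xs := by
        rw [← List.tail_drop, hdrop]
        rfl
      have hprev' : PySem.List.pyGetD adapters (((k + 1 : Nat) : Int) - 1) 0 = x := by
        push_cast
        simpa using hpyk
      rw [PySem.List.pyRange_one_cons (by exact_mod_cast hklt), List.foldl_cons]
      have hne0 : ((k : Int) == 0) = false := by
        simp only [beq_eq_false_iff_ne, ne_eq, Int.natCast_eq_zero]
        omega
      simp only [pvStepA, hne0, Bool.false_eq_true, if_false, hpyk, hprev]
      by_cases hdiff : x - prev = 1
      · rw [if_pos (by simpa using hdiff)]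
        have := ih (k + 1) x branches (cur ++ [(k : Int)]) hdrop' (by omega) hprev'
        push_cast at this
        rw [this]
        simp [pvRunsP, hdiff]
      · rw [if_neg (by simpa using hdiff)]
        by_cases hcur : cur = []
        · subst hcur
          rw [if_neg (by simp)]
          have := ih (k + 1) x branches [] hdrop' (by omega) hprev'
          push_cast at this
          rw [this]
          simp [pvRunsP, hdiff]
        · rw [if_pos (by simpa using hcur)]
          have := ih (k + 1) x (branches ++ [(cur.length : Int)]) [] hdrop' (by omega) hprev'
          push_cast at this
          rw [this]
          have hcl : cur.length ≠ 0 := by simpa [List.length_eq_zero_iff] using hcur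
          simp [pvRunsP, hdiff, hcl]

theorem pvA_eq (adapters : List Int) :
    getBranchesSizes adapters = pvRunsP 0 0 adapters := by
  cases adapters with
  | nil =>
      simp [getBranchesSizes, pvFinishA, PySem.List.pyRange_one_eq_nil, pvRunsP]
  | cons a rest =>
      unfold getBranchesSizes
      have hlen : (0 : Int) < ((a :: rest).length : Int) := by
        simp only [List.length_cons]
        push_cast
        omega
      rw [PySem.List.pyRange_one_cons hlen, List.foldl_cons]
      simp only [zero_add]
      have h0 : pvStepA (a :: rest) (([] : List Int), ([] : List Int)) 0
          = ([], if a = 1 then [(0 : Int)] else []) := by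
        by_cases ha : a = 1 <;>
          simp [pvStepA, PySem.List.pyGetD_zero_cons, ha]
      rw [h0]
      have hloop := pvA_loop (a :: rest) rest 1 a [] (if a = 1 then [(0 : Int)] else [])
        (by simp) (by omega) (by simp [PySem.List.pyGetD_zero_cons])
      push_cast at hloop
      rw [hloop]
      by_cases ha : a = 1 <;> simp [pvRunsP, ha]

-- ===== VERDICT (by name: the statement is the Claim_ definition above) =====
theorem getBranchesSizes_spec : Claim_equal_getBranchesSizes := by
  intro adapters _
  unfold Spec_getBranchesSizes
  rw [pvA_eq, pvB_eq]
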